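-- pv_equiv track=rewrite | github.com/QuentinNo07/Code-France-IOI | code_python/niveau_4/3 – Structures de données et Balayages/Couvrir des points avec un segment de longueur fixe.py | recherche
-- ===== SOURCE A (Python) =====
-- def recherche(liste, surface, nb_point):
--     compteur_max = 0
--     compteur = 0
--     j = 0
--     liste.sort()
--
--     for i in range(nb_point):
--         while j < nb_point and liste[j] <= liste[i] + surface:
--             j += 1
--         compteur = j - i
--         compteur_max = max(compteur, compteur_max)
--     return compteur_max
-- ===== SOURCE B (Python) =====
-- def recherche(liste, surface, nb_point):
--     liste.sort()
--     compteur_max = 0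
--     for i in range(nb_point):
--         x = liste[i] + surface
--         lo, hi = 0, nb_point
--         while lo < hi:
--             mid = (lo + hi) // 2
--             if liste[mid] <= x:
--                 lo = mid + 1
--             else:
--                 hi = mid
--         compteur_max = max(lo - i, compteur_max)
--     return compteur_max
-- ===== Notes on version B (the rewrite author's own statement) =====
-- stated objective: alternative
-- what changed: Replaces A's shared monotone two-pointer sweep (global j advanced by a while loop across iterations) with an independent hand-written binary search over the sorted prefix for each point; sorting still dominates, so no speed claim.
import Mathlib
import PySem

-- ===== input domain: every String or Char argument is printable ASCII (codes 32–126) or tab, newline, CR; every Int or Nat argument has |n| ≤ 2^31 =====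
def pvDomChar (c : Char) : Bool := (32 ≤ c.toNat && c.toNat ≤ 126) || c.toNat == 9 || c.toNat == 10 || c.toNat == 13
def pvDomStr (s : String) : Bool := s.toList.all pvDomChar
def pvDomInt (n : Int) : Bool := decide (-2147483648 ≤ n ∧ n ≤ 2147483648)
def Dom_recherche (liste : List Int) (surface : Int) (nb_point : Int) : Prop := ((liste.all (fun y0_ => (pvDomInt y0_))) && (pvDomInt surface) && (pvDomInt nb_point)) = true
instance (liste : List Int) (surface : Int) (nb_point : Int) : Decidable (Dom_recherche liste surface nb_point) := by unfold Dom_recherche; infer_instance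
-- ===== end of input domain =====

-- B replaces A's shared two-pointer sweep by an independent binary search per point (objective: alternative,
-- same asymptotic cost). Both A and B sort `liste` in place; the theorems below are about the return value
-- (the mutation is identical: both sort and nothing else).

-- ===== PORT A =====
-- A's inner `while j < nb_point and liste[j] <= liste[i] + surface: j += 1` (x = liste[i] + surface)
-- (fuel = the remaining iteration bound (nb - j).toNat; it only makes the loop total, the computation is A's)
def pvWhileA (l : List Int) (x : Int) (nb : Int) : Nat → Int → Int
  | 0, j => j
  | fuel + 1, j => if j < nb ∧ PySem.List.pyGetD l j 0 ≤ x then pvWhileA l x nb fuel (j + 1) else j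

def recherche (liste : List Int) (surface : Int) (nb_point : Int) : Int :=
  let l := PySem.List.sorted liste (fun y => y) false
  ((PySem.List.pyRange 0 nb_point 1).foldl
    (fun (st : Int × Int) i =>
      let j := pvWhileA l (PySem.List.pyGetD l i 0 + surface) nb_point (nb_point - st.2).toNat st.2
      (max (j - i) st.1, j))
    (0, 0)).1

-- ===== PORT B =====
-- B's hand-written binary search: `while lo < hi: mid = (lo+hi)//2; if liste[mid] <= x: lo = mid+1 else: hi = mid`
-- (fuel = (hi - lo).toNat, enough for the halving loop; it only makes the loop total, the computation is B's)
def pvBisB (l : List Int) (x : Int) : Nat → Int → Int → Int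
  | 0, lo, _ => lo
  | fuel + 1, lo, hi =>
    if lo < hi then
      let mid := PySem.Int.floordiv (lo + hi) 2
      if PySem.List.pyGetD l mid 0 ≤ x then pvBisB l x fuel (mid + 1) hi
      else pvBisB l x fuel lo mid
    else lo

def recherche_alt (liste : List Int) (surface : Int) (nb_point : Int) : Int :=
  let l := PySem.List.sorted liste (fun y => y) false
  (PySem.List.pyRange 0 nb_point 1).foldl
    (fun m i =>
      let x := PySem.List.pyGetD l i 0 + surface
      max (pvBisB l x nb_point.toNat 0 nb_point - i) m)
    0

-- ===== PRECONDITION & SPEC =====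
-- Pre_ excludes exactly the inputs where Python A raises IndexError (liste[i] with nb_point > len(liste)); B raises there too.
def Pre_recherche (liste : List Int) (surface : Int) (nb_point : Int) : Prop := nb_point ≤ (liste.length : Int)
instance (liste : List Int) (surface : Int) (nb_point : Int) : Decidable (Pre_recherche liste surface nb_point) := by unfold Pre_recherche; infer_instance
def pvWitness_recherche : List Int × Int × Int := ([1, 5, 2, 9], 3, 4)

def Spec_recherche (liste : List Int) (surface : Int) (nb_point : Int) (out : Int) : Prop := out = recherche_alt liste surface nb_point
instance (liste : List Int) (surface : Int) (nb_point : Int) (out : Int) : Decidable (Spec_recherche liste surface nb_point out) := by unfold Spec_recherche; infer_instance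

-- ===== CLAIM (what is proved, stated in full; the proofs are below) =====
def Claim_equal_recherche : Prop := ∀ (liste : List Int) (surface : Int) (nb_point : Int), Dom_recherche liste surface nb_point → Pre_recherche liste surface nb_point → Spec_recherche liste surface nb_point (recherche liste surface nb_point)

-- ===== LEMMAS AND PROOFS =====

-- the number of entries among the first nb of l that are ≤ x (for sorted l, the common value of
-- A's advanced j and B's binary-search result)
def pvCnt (l : List Int) (x : Int) (nb : Int) : Int :=
  (((l.take nb.toNat).takeWhile (fun y => decide (y ≤ x))).length : Int)

lemma pvCnt_nonneg (l : List Int) (x nb : Int) : 0 ≤ pvCnt l x nb := Int.natCast_nonneg _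

lemma pvCnt_le_len (l : List Int) (x nb : Int) : pvCnt l x nb ≤ (l.length : Int) := by
  unfold pvCnt
  have h1 := (List.takeWhile_prefix (p := fun y => decide (y ≤ x)) (l := l.take nb.toNat)).length_le
  have h2 : (l.take nb.toNat).length ≤ l.length := by rw [List.length_take]; omega
  omega

lemma pvCnt_le_toNat (l : List Int) (x nb : Int) : pvCnt l x nb ≤ (nb.toNat : Int) := by
  unfold pvCnt
  have h1 := (List.takeWhile_prefix (p := fun y => decide (y ≤ x)) (l := l.take nb.toNat)).length_le
  have h2 : (l.take nb.toNat).length ≤ nb.toNat := by simp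
  omega

lemma pvTakeWhile_len_mono {α : Type} (p q : α → Bool) (h : ∀ y, p y = true → q y = true) :
    ∀ (u : List α), (u.takeWhile p).length ≤ (u.takeWhile q).length := by
  intro u
  induction u with
  | nil => simp
  | cons a t ih =>
    by_cases hpa : p a = true
    · simp [hpa, h a hpa]; exact ih
    · simp [hpa]

lemma pvTakeWhile_boundary {α : Type} (p : α → Bool) :
    ∀ (u : List α) (h : (u.takeWhile p).length < u.length),
      ¬ (p (u[(u.takeWhile p).length]'h) = true) := by
  intro u
  induction u with
  | nil => intro h; simp at h
  | cons a t ih =>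
    intro h
    by_cases hpa : p a = true
    · simp only [List.takeWhile_cons, hpa, if_true, List.length_cons] at h ⊢
      simpa using ih (by omega)
    · simp [hpa]

lemma pvCnt_mono (l : List Int) (nb x x' : Int) (h : x ≤ x') : pvCnt l x nb ≤ pvCnt l x' nb := by
  unfold pvCnt
  have := pvTakeWhile_len_mono (fun y => decide (y ≤ x)) (fun y => decide (y ≤ x'))
    (by intro y hy; simp at hy ⊢; omega) (l.take nb.toNat)
  omega

lemma pvCnt_getElem_le (l : List Int) (x nb : Int) (k : Nat) (hkl : k < l.length)
    (hk : (k : Int) < pvCnt l x nb) : l[k] ≤ x := by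
  unfold pvCnt at hk
  have hk' : k < ((l.take nb.toNat).takeWhile (fun y => decide (y ≤ x))).length := by omega
  have hpre : (l.take nb.toNat).takeWhile (fun y => decide (y ≤ x)) <+: l :=
    (List.takeWhile_prefix _).trans (List.take_prefix _ _)
  have heq := hpre.getElem hk'
  have hmem : ((l.take nb.toNat).takeWhile (fun y => decide (y ≤ x)))[k] ∈
      (l.take nb.toNat).takeWhile (fun y => decide (y ≤ x)) := List.getElem_mem _
  have hp := List.mem_takeWhile_imp hmem
  simp only [decide_eq_true_eq] at hp
  rwa [heq] at hp

lemma pvCnt_getElem_gt (l : List Int) (x nb : Int) (hs : l.Pairwise (· ≤ ·))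
    (hnl : nb ≤ (l.length : Int)) (k : Nat) (hkl : k < l.length)
    (hck : pvCnt l x nb ≤ (k : Int)) (hkn : (k : Int) < nb) : ¬ (l[k] ≤ x) := by
  set u := l.take nb.toNat with hu
  set c := (u.takeWhile (fun y => decide (y ≤ x))).length with hc
  have hcnt : pvCnt l x nb = (c : Int) := rfl
  have hul : u.length = nb.toNat := by
    rw [hu, List.length_take]; omega
  have hcu : c < u.length := by omega
  have hb := pvTakeWhile_boundary (fun y => decide (y ≤ x)) u hcu
  have hcl : c < l.length := by omega
  have hub : u[c] = l[c]'hcl := List.getElem_take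
  rw [hub] at hb
  simp only [decide_eq_true_eq] at hb
  -- x < l[c] and l[c] ≤ l[k]
  intro hle
  have hck' : c ≤ k := by omega
  rcases eq_or_lt_of_le hck' with hEq | hLt
  · subst hEq; exact hb hle
  · have := List.pairwise_iff_getElem.mp hs c k hcl hkl hLt
    exact hb (le_trans this hle)

lemma pvWhileA_eq (l : List Int) (x nb : Int) (hs : l.Pairwise (· ≤ ·))
    (hnl : nb ≤ (l.length : Int)) :
    ∀ (fuel : Nat) (j : Int), 0 ≤ j → j ≤ pvCnt l x nb → (pvCnt l x nb - j).toNat ≤ fuel →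
      pvWhileA l x nb fuel j = pvCnt l x nb := by
  intro fuel
  induction fuel with
  | zero =>
    intro j h0 hle hd
    have hj : j = pvCnt l x nb := by omega
    simpa [pvWhileA] using hj
  | succ d ih =>
    intro j h0 hle hd
    rcases eq_or_lt_of_le hle with hj | hjc
    · subst hj
      rw [pvWhileA, if_neg]
      rintro ⟨h1, h2⟩
      have h0c := pvCnt_nonneg l x nb
      have hkl : (pvCnt l x nb).toNat < l.length := by omega
      rw [PySem.List.pyGetD_eq_getElem l 0 h0c (by omega)] at h2
      exact pvCnt_getElem_gt l x nb hs hnl _ hkl (by omega) (by omega) h2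
    · have hcle := pvCnt_le_toNat l x nb
      have hlen := pvCnt_le_len l x nb
      have hjl : j.toNat < l.length := by omega
      rw [pvWhileA, if_pos ⟨by omega, by
        rw [PySem.List.pyGetD_eq_getElem l 0 h0 (by omega)]
        exact pvCnt_getElem_le l x nb j.toNat hjl (by omega)⟩]
      exact ih (j + 1) (by omega) (by omega) (by omega)

lemma pvBisB_eq (l : List Int) (x nb : Int) (hs : l.Pairwise (· ≤ ·))
    (hnl : nb ≤ (l.length : Int)) :
    ∀ (fuel : Nat) (lo hi : Int), (hi - lo).toNat ≤ fuel → 0 ≤ lo → lo ≤ pvCnt l x nb →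
      pvCnt l x nb ≤ hi → hi ≤ nb → pvBisB l x fuel lo hi = pvCnt l x nb := by
  intro fuel
  induction fuel with
  | zero =>
    intro lo hi hf h0 hloc hchi hhin
    have : lo = pvCnt l x nb := by omega
    simpa [pvBisB] using this
  | succ f ih =>
    intro lo hi hf h0 hloc hchi hhin
    by_cases hlt : lo < hi
    · have hmb := PySem.Int.floordiv_two_mid_bounds (le_of_lt hlt)
      have hmhi := (PySem.Int.floordiv_lt_iff_lt_mul (a := lo + hi) (b := 2) (q := hi) (by norm_num)).mpr (by omega)
      rw [pvBisB, if_pos hlt]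
      by_cases hmidle : PySem.List.pyGetD l (PySem.Int.floordiv (lo + hi) 2) 0 ≤ x
      · rw [if_pos hmidle]
        apply ih _ _ (by omega) (by omega) _ hchi hhin
        -- mid < pvCnt: otherwise l[mid] > x
        by_contra hcon
        have hml : (PySem.Int.floordiv (lo + hi) 2).toNat < l.length := by omega
        rw [PySem.List.pyGetD_eq_getElem l 0 (by omega) (by omega)] at hmidle
        exact pvCnt_getElem_gt l x nb hs hnl _ hml (by omega) (by omega) hmidle
      · rw [if_neg hmidle]
        apply ih _ _ (by omega) h0 hloc _ (by omega)
        -- pvCnt ≤ mid: otherwise l[mid] ≤ x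
        by_contra hcon
        have hml : (PySem.Int.floordiv (lo + hi) 2).toNat < l.length := by
          have := pvCnt_le_len l x nb; omega
        rw [PySem.List.pyGetD_eq_getElem l 0 (by omega) (by omega)] at hmidle
        exact hmidle (pvCnt_getElem_le l x nb _ hml (by omega))
    · rw [pvBisB, if_neg hlt]
      omega

lemma pvFold_eq (l : List Int) (surface nb : Int) (hs : l.Pairwise (· ≤ ·))
    (hnl : nb ≤ (l.length : Int)) :
    ∀ (d : Nat) (i m j : Int), 0 ≤ i → (nb - i).toNat = d → 0 ≤ j →
      (i < nb → j ≤ pvCnt l (PySem.List.pyGetD l i 0 + surface) nb) →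
      ((PySem.List.pyRange i nb 1).foldl
        (fun (st : Int × Int) k =>
          let jn := pvWhileA l (PySem.List.pyGetD l k 0 + surface) nb (nb - st.2).toNat st.2
          (max (jn - k) st.1, jn))
        (m, j)).1
      = (PySem.List.pyRange i nb 1).foldl
        (fun acc k =>
          let x := PySem.List.pyGetD l k 0 + surface
          max (pvBisB l x nb.toNat 0 nb - k) acc)
        m := by
  intro d
  induction d with
  | zero =>
    intro i m j h0 hd hj0 hH
    rw [PySem.List.pyRange_one_eq_nil (by omega)]
    simp
  | succ d ih =>
    intro i m j h0 hd hj0 hH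
    have hin : i < nb := by omega
    rw [PySem.List.pyRange_one_cons hin]
    simp only [List.foldl_cons]
    set x := PySem.List.pyGetD l i 0 + surface with hx
    have hcle := pvCnt_le_toNat l x nb
    have hw := pvWhileA_eq l x nb hs hnl (nb - j).toNat j hj0 (hH hin) (by omega)
    have hb := pvBisB_eq l x nb hs hnl nb.toNat 0 nb (by omega) le_rfl (pvCnt_nonneg l x nb)
      (by omega) le_rfl
    rw [hw, hb]
    apply ih (i + 1) (max (pvCnt l x nb - i) m) (pvCnt l x nb) (by omega) (by omega)
      (pvCnt_nonneg l x nb)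
    intro hin1
    apply pvCnt_mono
    have h1 : i.toNat < l.length := by omega
    have h2 : (i + 1).toNat < l.length := by omega
    rw [hx, PySem.List.pyGetD_eq_getElem l 0 h0 (by omega),
        PySem.List.pyGetD_eq_getElem l 0 (by omega) (by omega)]
    have := List.pairwise_iff_getElem.mp hs i.toNat (i + 1).toNat h1 h2 (by omega)
    omega

-- ===== VERDICT (by name: the statement is the Claim_ definition above) =====
theorem recherche_spec : Claim_equal_recherche := by
  intro liste surface nb_point _hdom hpre
  unfold Spec_recherche recherche recherche_alt
  have hs : (PySem.List.sorted liste (fun y => y) false).Pairwise (· ≤ ·) :=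
    PySem.List.sorted_pairwise liste (fun y => y)
  have hnl : nb_point ≤ ((PySem.List.sorted liste (fun y => y) false).length : Int) := by
    rw [PySem.List.length_sorted]; exact hpre
  exact pvFold_eq (PySem.List.sorted liste (fun y => y) false) surface nb_point hs hnl
    (nb_point - 0).toNat 0 0 0 le_rfl rfl le_rfl
    (fun _ => pvCnt_nonneg _ _ _)
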